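-- pv_equiv track=rewrite | github.com/paiml/depyler | examples/hard_nested_comprehensions.py | char_frequency_map
-- ===== SOURCE A (Python) =====
-- from typing import List, Dict, Set, Tuple, Optional
--
-- def char_frequency_map(texts: List[str]) -> Dict[str, Dict[str, int]]:
--     """Build char frequency for each text."""
--     return {
--         text[:20]: {
--             ch: text.count(ch)
--             for ch in sorted(set(text))
--             if ch.isalpha()
--         }
--         for text in texts
--         if len(text) > 0
--     }
-- ===== SOURCE B (Python) =====
-- def char_frequency_map(texts):
--     """Build char frequency for each text: sort once and run-length count,
--     instead of scanning the whole text with .count for every distinct char."""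
--     result = {}
--     for text in texts:
--         if len(text) > 0:
--             s = sorted(text)
--             freq = {}
--             i = 0
--             n = len(s)
--             while i < n:
--                 j = i
--                 while j < n and s[j] == s[i]:
--                     j += 1
--                 if s[i].isalpha():
--                     freq[s[i]] = j - i
--                 i = j
--             result[text[:20]] = freq
--     return result
-- ===== Notes on version B (the rewrite author's own statement) =====
-- stated objective: alternative
-- what changed: Replaces A's dict comprehension that rescans the whole text with text.count(ch) for every distinct character of sorted(set(text)) by an explicit loop that sorts each text once and counts runs of equal characters in a single pass over the sorted list.
import Mathlib
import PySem

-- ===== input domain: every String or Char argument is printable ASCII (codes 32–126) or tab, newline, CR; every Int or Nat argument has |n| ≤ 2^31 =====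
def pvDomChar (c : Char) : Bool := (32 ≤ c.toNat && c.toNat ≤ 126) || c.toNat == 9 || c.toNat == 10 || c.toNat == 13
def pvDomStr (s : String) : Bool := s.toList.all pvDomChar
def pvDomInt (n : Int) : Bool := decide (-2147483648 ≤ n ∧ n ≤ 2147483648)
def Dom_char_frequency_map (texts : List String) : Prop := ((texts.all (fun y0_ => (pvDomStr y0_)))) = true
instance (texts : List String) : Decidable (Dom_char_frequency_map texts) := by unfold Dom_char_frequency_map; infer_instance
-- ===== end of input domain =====

-- B replaces A's per-distinct-char full-text .count scans by one sort of the text followed by a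
-- single run-length pass (objective: alternative traversal of the same data).

-- ===== PORT A =====
-- inner dict comprehension of A: its keys — the 1-char strings of sorted(set(text)) — are
-- pairwise distinct, so building the association list directly in iteration order is exact;
-- text.count(ch) for the 1-char string ch is the character count, ported as List.count.
def pvInnerA (text : String) : List (String × Int) :=
  (PySem.List.sorted (PySem.Set.ofList text.toList) (fun c => c)).filterMap
    (fun ch => if PySem.Chars.isalpha ch then
        some (String.ofList [ch], (text.toList.count ch : Int)) else none)

def char_frequency_map (texts : List String) : List (String × List (String × Int)) :=
  (texts.foldl (fun d text =>
      if PySem.Str.len text > 0 then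
        d.insert (PySem.Str.slice text none (some 20)) (pvInnerA text)
      else d) PySem.Dict.empty).items

-- ===== PORT B =====
-- Source B's inner while loops over the sorted char list: each outer step consumes one run
-- s[i..j) of equal chars (takeWhile/dropWhile) and, if alphabetic, records its length.
def pvRunFreq : List Char → List (String × Int)
  | [] => []
  | c :: rest =>
    if PySem.Chars.isalpha c then
      (String.ofList [c], (1 + ((rest.takeWhile (fun x => x == c)).length : Int))) ::
        pvRunFreq (rest.dropWhile (fun x => x == c))
    else
      pvRunFreq (rest.dropWhile (fun x => x == c))
  termination_by s => s.length
  decreasing_by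
    all_goals
      have h := (List.dropWhile_sublist (l := rest) (fun x => x == c)).length_le
      simp only [List.length_cons]; omega

def char_frequency_map_alt (texts : List String) : List (String × List (String × Int)) :=
  (texts.foldl (fun d text =>
      if PySem.Str.len text > 0 then
        d.insert (PySem.Str.slice text none (some 20))
          (pvRunFreq (PySem.List.sorted text.toList (fun c => c)))
      else d) PySem.Dict.empty).items

-- ===== PRECONDITION & SPEC =====
def Spec_char_frequency_map (texts : List String) (out : List (String × List (String × Int))) : Prop := out = char_frequency_map_alt texts
instance (texts : List String) (out : List (String × List (String × Int))) : Decidable (Spec_char_frequency_map texts out) := by unfold Spec_char_frequency_map; infer_instance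

-- ===== CLAIM (what is proved, stated in full; the proofs are below) =====
def Claim_equal_char_frequency_map : Prop := ∀ (texts : List String), Dom_char_frequency_map texts → Spec_char_frequency_map texts (char_frequency_map texts)

-- ===== LEMMAS AND PROOFS =====

-- the run-head list of a sorted char list: first char of each run
def pvDKeys : List Char → List Char
  | [] => []
  | c :: rest => c :: pvDKeys (rest.dropWhile (fun x => x == c))
  termination_by s => s.length
  decreasing_by
    have h := (List.dropWhile_sublist (l := rest) (fun x => x == c)).length_le
    simp only [List.length_cons]; omega

-- in a ≤-sorted list, dropping the leading run of c drops every c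
lemma pv_not_mem_dropWhile (c : Char) (rest : List Char)
    (h : (c :: rest).Pairwise (· ≤ ·)) :
    c ∉ rest.dropWhile (fun x => x == c) := by
  intro hc
  have hdne : rest.dropWhile (fun x => x == c) ≠ [] := by
    intro h0; rw [h0] at hc; simp at hc
  have hsub : (rest.dropWhile (fun x => x == c)).Sublist rest :=
    List.dropWhile_sublist _
  have hle : ∀ x ∈ rest, c ≤ x := (List.pairwise_cons.1 h).1
  have hpd : (rest.dropWhile (fun x => x == c)).Pairwise (· ≤ ·) :=
    ((List.pairwise_cons.1 h).2).sublist hsub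
  obtain ⟨e, t, hdt⟩ := List.exists_cons_of_ne_nil hdne
  have hhead := List.head_dropWhile_not (fun x => x == c) hdne
  simp only [hdt, List.head_cons] at hhead
  have hec : e ≠ c := by simpa using hhead
  have hce : c ≤ e := hle e (hsub.mem (by rw [hdt]; exact List.mem_cons_self))
  rw [hdt] at hc hpd
  rcases List.mem_cons.1 hc with h1 | h1
  · exact hec h1.symm
  · have : e ≤ c := (List.pairwise_cons.1 hpd).1 c h1
    exact hec (le_antisymm this hce)

lemma pv_mem_dkeys : ∀ (l : List Char), l.Pairwise (· ≤ ·) →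
    ∀ x, x ∈ pvDKeys l ↔ x ∈ l := by
  intro l
  induction l using pvDKeys.induct with
  | case1 => intro _ x; simp [pvDKeys]
  | case2 c rest ih =>
    intro h x
    have hpd : (rest.dropWhile (fun x => x == c)).Pairwise (· ≤ ·) :=
      ((List.pairwise_cons.1 h).2).sublist (List.dropWhile_sublist _)
    rw [pvDKeys]
    constructor
    · intro hx
      rcases List.mem_cons.1 hx with h1 | h1
      · simp [h1]
      · have := ((ih hpd x).1 h1)
        exact List.mem_cons.2 (Or.inr ((List.dropWhile_sublist _).mem this))
    · intro hx
      rcases List.mem_cons.1 hx with h1 | h1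
      · simp [h1]
      · conv at h1 => rw [← List.takeWhile_append_dropWhile (p := fun x => x == c) (l := rest)]
        rcases List.mem_append.1 h1 with h2 | h2
        · have : x = c := by simpa using List.mem_takeWhile_imp h2
          simp [this]
        · exact List.mem_cons.2 (Or.inr ((ih hpd x).2 h2))

lemma pv_pairwise_lt_dkeys : ∀ (l : List Char), l.Pairwise (· ≤ ·) →
    (pvDKeys l).Pairwise (· < ·) := by
  intro l
  induction l using pvDKeys.induct with
  | case1 => intro _; simp [pvDKeys]
  | case2 c rest ih =>
    intro h
    have hpd : (rest.dropWhile (fun x => x == c)).Pairwise (· ≤ ·) :=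
      ((List.pairwise_cons.1 h).2).sublist (List.dropWhile_sublist _)
    rw [pvDKeys, List.pairwise_cons]
    refine ⟨?_, ih hpd⟩
    intro y hy
    have hyd : y ∈ rest.dropWhile (fun x => x == c) := (pv_mem_dkeys _ hpd y).1 hy
    have hyr : y ∈ rest := (List.dropWhile_sublist _).mem hyd
    have hcy : c ≤ y := (List.pairwise_cons.1 h).1 y hyr
    have hne : c ≠ y := by
      intro he; exact pv_not_mem_dropWhile c rest h (he ▸ hyd)
    exact lt_of_le_of_ne hcy hne

-- head-run length = count of the head char in the whole sorted list
lemma pv_count_head (c : Char) (rest : List Char)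
    (h : (c :: rest).Pairwise (· ≤ ·)) :
    (c :: rest).count c = 1 + (rest.takeWhile (fun x => x == c)).length := by
  rw [List.count_cons_self]
  conv_lhs => rw [← List.takeWhile_append_dropWhile (p := fun x => x == c) (l := rest)]
  rw [List.count_append]
  have h1 : (rest.takeWhile (fun x => x == c)).count c =
      (rest.takeWhile (fun x => x == c)).length := by
    apply List.count_eq_length.2
    intro b hb
    have hb' := List.mem_takeWhile_imp hb
    exact (eq_of_beq (by simpa using hb')).symm
  have h2 : (rest.dropWhile (fun x => x == c)).count c = 0 :=
    List.count_eq_zero.2 (pv_not_mem_dropWhile c rest h)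
  omega

-- counts of the other chars survive dropping the head run
lemma pv_count_tail (c : Char) (rest : List Char) (x : Char) (hx : x ≠ c) :
    (c :: rest).count x = (rest.dropWhile (fun x => x == c)).count x := by
  rw [List.count_cons_of_ne (Ne.symm hx)]
  conv_lhs => rw [← List.takeWhile_append_dropWhile (p := fun x => x == c) (l := rest)]
  rw [List.count_append]
  have h1 : (rest.takeWhile (fun x => x == c)).count x = 0 := by
    apply List.count_eq_zero.2
    intro hm
    exact hx (by simpa using List.mem_takeWhile_imp hm)
  omega

-- B's run-length pass, on a ≤-sorted list, is A's per-key count map over the run heads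
lemma pv_runFreq_eq : ∀ (l : List Char), l.Pairwise (· ≤ ·) →
    pvRunFreq l = (pvDKeys l).filterMap
      (fun ch => if PySem.Chars.isalpha ch then
          some (String.ofList [ch], (l.count ch : Int)) else none) := by
  intro l
  induction l using pvDKeys.induct with
  | case1 => intro _; simp [pvRunFreq, pvDKeys]
  | case2 c rest ih =>
    intro h
    have hpd : (rest.dropWhile (fun x => x == c)).Pairwise (· ≤ ·) :=
      ((List.pairwise_cons.1 h).2).sublist (List.dropWhile_sublist _)
    have htail : pvRunFreq (rest.dropWhile (fun x => x == c)) =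
        (pvDKeys (rest.dropWhile (fun x => x == c))).filterMap
          (fun ch => if PySem.Chars.isalpha ch then
              some (String.ofList [ch], ((c :: rest).count ch : Int)) else none) := by
      rw [ih hpd]
      apply List.filterMap_congr
      intro x hxk
      have hxd : x ∈ rest.dropWhile (fun x => x == c) := (pv_mem_dkeys _ hpd x).1 hxk
      have hxc : x ≠ c := by
        intro he; exact pv_not_mem_dropWhile c rest h (he ▸ hxd)
      rw [pv_count_tail c rest x hxc]
    have hcnt : ((c :: rest).count c : Int) =
        1 + ((rest.takeWhile (fun x => x == c)).length : Int) := by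
      have := pv_count_head c rest h
      omega
    rw [pvRunFreq, pvDKeys, List.filterMap_cons]
    by_cases ha : PySem.Chars.isalpha c
    · simp [ha, htail]
      have hch := pv_count_head c rest h
      simp [List.count_cons_self] at hch
      omega
    · simp [ha, htail]

-- the run heads of a ≤-sorted list ARE sorted(set(l))
lemma pv_sorted_set_eq_dkeys (l : List Char) (h : l.Pairwise (· ≤ ·)) :
    PySem.List.sorted (PySem.Set.ofList l) (fun c => c) = pvDKeys l := by
  apply PySem.List.sorted_eq_of_perm_of_pairwise_lt
  · apply (List.perm_ext_iff_of_nodup ?_ (PySem.Set.nodup_ofList l)).2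
    · intro a
      rw [pv_mem_dkeys l h a, PySem.Set.mem_ofList]
    · exact (pv_pairwise_lt_dkeys l h).imp (fun hab => ne_of_lt hab)
  · exact pv_pairwise_lt_dkeys l h

-- per text: B's inner loop equals A's inner comprehension
lemma pv_inner_eq (text : String) :
    pvRunFreq (PySem.List.sorted text.toList (fun c => c)) = pvInnerA text := by
  set cs := text.toList with hcs
  set l := PySem.List.sorted cs (fun c => c) with hl
  have hpl : l.Pairwise (· ≤ ·) := by
    have := PySem.List.sorted_pairwise cs (fun c => c)
    simpa using this
  have hperm : l.Perm cs := PySem.List.sorted_perm cs (fun c => c) false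
  have hsets : PySem.List.sorted (PySem.Set.ofList cs) (fun c => c) =
      PySem.List.sorted (PySem.Set.ofList l) (fun c => c) := by
    apply PySem.List.sorted_eq_sorted_of_perm _ _ _ (fun a b hab => hab)
    apply (List.perm_ext_iff_of_nodup (PySem.Set.nodup_ofList cs) (PySem.Set.nodup_ofList l)).2
    intro a
    rw [PySem.Set.mem_ofList, PySem.Set.mem_ofList]
    exact ⟨fun hm => (hperm.mem_iff).2 hm, fun hm => (hperm.mem_iff).1 hm⟩
  rw [pv_runFreq_eq l hpl, ← pv_sorted_set_eq_dkeys l hpl]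
  unfold pvInnerA
  rw [← hcs, hsets]
  apply List.filterMap_congr
  intro x _
  rw [hperm.count_eq x]

-- ===== VERDICT (by name: the statement is the Claim_ definition above) =====
theorem char_frequency_map_spec : Claim_equal_char_frequency_map := by
  intro texts _
  unfold Spec_char_frequency_map char_frequency_map char_frequency_map_alt
  have hfun : (fun (d : PySem.Dict String (List (String × Int))) text =>
      if PySem.Str.len text > 0 then
        d.insert (PySem.Str.slice text none (some 20)) (pvInnerA text)
      else d) =
      (fun (d : PySem.Dict String (List (String × Int))) text =>
      if PySem.Str.len text > 0 then
        d.insert (PySem.Str.slice text none (some 20))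
          (pvRunFreq (PySem.List.sorted text.toList (fun c => c)))
      else d) := by
    funext d text
    rw [pv_inner_eq text]
  rw [hfun]
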